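-- pv_equiv track=rewrite | github.com/lindanguyen886/portfolio-assistant-ai | app.py | _parse_sentiment
-- ===== SOURCE A (Python) =====
-- def _parse_sentiment(sentiment):
--     text = str(sentiment).strip()
--     if not text:
--         return "N/A", "N/A", ""
--
--     mood = "N/A"
--     confidence = "N/A"
--     reasoning = ""
--
--     for line in text.splitlines():
--         line = line.strip()
--         lower = line.lower()
--         if lower.startswith("sentiment:"):
--             mood = line.split(":", 1)[1].strip()
--         elif lower.startswith("confidence:"):
--             confidence = line.split(":", 1)[1].strip()
--         elif lower.startswith("reasoning:"):
--             reasoning = line.split(":", 1)[1].strip()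
--
--     if mood == "N/A" and "\n" not in text:
--         mood = text
--
--     return mood, confidence, reasoning
-- ===== SOURCE B (Python) =====
-- def _parse_sentiment(sentiment):
--     text = str(sentiment).strip()
--     if not text:
--         return "N/A", "N/A", ""
--
--     lines = [ln.strip() for ln in text.splitlines()]
--     lines.reverse()
--
--     def last_value(prefix, default):
--         # first match in the reversed list = last assignment in the original order
--         for ln in lines:
--             if ln.lower().startswith(prefix):
--                 return ln.split(":", 1)[1].strip()
--         return default
--
--     mood = last_value("sentiment:", "N/A")
--     confidence = last_value("confidence:", "N/A")
--     reasoning = last_value("reasoning:", "")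
--
--     if mood == "N/A" and "\n" not in text:
--         mood = text
--     return mood, confidence, reasoning
-- ===== Notes on version B (the rewrite author's own statement) =====
-- stated objective: alternative
-- what changed: Instead of one forward pass mutating a (mood, confidence, reasoning) triple through an elif chain, B reverses the stripped lines once and answers each of the three fields by an independent first-match search from the end (the three prefixes are mutually exclusive, so the last assignment equals the first match in reverse).
import Mathlib
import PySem

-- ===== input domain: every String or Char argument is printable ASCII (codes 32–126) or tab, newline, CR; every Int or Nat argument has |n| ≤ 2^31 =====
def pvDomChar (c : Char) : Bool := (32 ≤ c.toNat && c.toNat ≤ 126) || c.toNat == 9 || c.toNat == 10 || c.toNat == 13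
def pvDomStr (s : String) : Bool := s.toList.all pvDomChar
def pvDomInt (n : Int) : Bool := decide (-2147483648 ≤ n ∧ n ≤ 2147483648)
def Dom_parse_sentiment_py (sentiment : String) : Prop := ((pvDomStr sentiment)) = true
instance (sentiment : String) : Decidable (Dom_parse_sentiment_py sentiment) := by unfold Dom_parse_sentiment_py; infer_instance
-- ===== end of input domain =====

-- B replaces A's single forward pass mutating a triple through an elif chain by three independent
-- first-match searches over the reversed stripped lines (the three prefixes are mutually exclusive,
-- so the last assignment equals the first match in reverse); same return value, no speed claim.

-- ===== PORT A =====
-- line.split(":", 1)[1].strip(); the [1] index is written with pyGetD: A only evaluates it on lines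
-- that start with "<key>:", where split(":",1) returns exactly two pieces, so the defaults are never
-- reached (and splitMax? is some because the separator ":" is nonempty) — exact there.
def pvA_after (line : String) : String :=
  PySem.Str.strip (PySem.List.pyGetD ((PySem.Str.splitMax? line ":" 1).getD []) 1 "")

def pvA_step (st : String × String × String) (rawline : String) : String × String × String :=
  let line := PySem.Str.strip rawline
  let lower := PySem.Str.lower line
  if PySem.Str.startswith lower "sentiment:" then (pvA_after line, st.2.1, st.2.2)
  else if PySem.Str.startswith lower "confidence:" then (st.1, pvA_after line, st.2.2)
  else if PySem.Str.startswith lower "reasoning:" then (st.1, st.2.1, pvA_after line)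
  else st

def parse_sentiment_py (sentiment : String) : String × String × String :=
  let text := PySem.Str.strip sentiment
  if text = "" then ("N/A", "N/A", "")
  else
    let st := (PySem.Str.splitlines text).foldl pvA_step ("N/A", "N/A", "")
    let mood := if st.1 = "N/A" ∧ PySem.Str.isIn "\n" text = false then text else st.1
    (mood, st.2.1, st.2.2)

-- ===== PORT B =====
-- ln.split(":", 1)[1].strip() as in A's source line; same exactness remark as for pvA_after.
def pvB_val (ln : String) : String :=
  PySem.Str.strip (PySem.List.pyGetD ((PySem.Str.splitMax? ln ":" 1).getD []) 1 "")

-- the 'for ln in lines: if …: return …' early-return loop of last_value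
def pvB_last (lines : List String) (pre dflt : String) : String :=
  match lines with
  | [] => dflt
  | ln :: rest =>
    if PySem.Str.startswith (PySem.Str.lower ln) pre then pvB_val ln
    else pvB_last rest pre dflt

def parse_sentiment_py_alt (sentiment : String) : String × String × String :=
  let text := PySem.Str.strip sentiment
  if text = "" then ("N/A", "N/A", "")
  else
    let lines := ((PySem.Str.splitlines text).map PySem.Str.strip).reverse
    let mood0 := pvB_last lines "sentiment:" "N/A"
    let confidence := pvB_last lines "confidence:" "N/A"
    let reasoning := pvB_last lines "reasoning:" ""
    let mood := if mood0 = "N/A" ∧ PySem.Str.isIn "\n" text = false then text else mood0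
    (mood, confidence, reasoning)

-- ===== PRECONDITION & SPEC =====
def Spec_parse_sentiment_py (sentiment : String) (out : String × String × String) : Prop := out = parse_sentiment_py_alt sentiment
instance (sentiment : String) (out : String × String × String) : Decidable (Spec_parse_sentiment_py sentiment out) := by unfold Spec_parse_sentiment_py; infer_instance

-- ===== CLAIM (what is proved, stated in full; the proofs are below) =====
def Claim_equal_parse_sentiment_py : Prop := ∀ (sentiment : String), Dom_parse_sentiment_py sentiment → Spec_parse_sentiment_py sentiment (parse_sentiment_py sentiment)

-- ===== LEMMAS AND PROOFS =====

-- a (c :: p)-prefix pins the head of the list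
theorem sw_head (l p : List Char) (c : Char)
    (h : PySem.Chars.startswith l (c :: p) = true) : l.head? = some c := by
  obtain ⟨t, ht⟩ := (PySem.Chars.startswith_iff _ _).mp h
  rw [← ht]; rfl

-- prefixes with different first characters are mutually exclusive
theorem sw_excl (l : List Char) (c d : Char) (p q : List Char) (hcd : c ≠ d)
    (h : PySem.Chars.startswith l (c :: p) = true) :
    PySem.Chars.startswith l (d :: q) = false := by
  by_contra hb
  have hT : PySem.Chars.startswith l (d :: q) = true := by
    revert hb; cases PySem.Chars.startswith l (d :: q) <;> simp
  have h1 := sw_head l p c h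
  have h2 := sw_head l q d hT
  rw [h1] at h2
  exact hcd (Option.some.injEq _ _ ▸ h2)

theorem excl_sc (ll : String) (h : PySem.Str.startswith ll "sentiment:" = true) :
    PySem.Str.startswith ll "confidence:" = false := by
  rw [PySem.Str.startswith_eq] at h ⊢
  exact sw_excl ll.toList 's' 'c' "entiment:".toList "onfidence:".toList (by decide) h

theorem excl_sr (ll : String) (h : PySem.Str.startswith ll "sentiment:" = true) :
    PySem.Str.startswith ll "reasoning:" = false := by
  rw [PySem.Str.startswith_eq] at h ⊢
  exact sw_excl ll.toList 's' 'r' "entiment:".toList "easoning:".toList (by decide) h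

theorem excl_cr (ll : String) (h : PySem.Str.startswith ll "confidence:" = true) :
    PySem.Str.startswith ll "reasoning:" = false := by
  rw [PySem.Str.startswith_eq] at h ⊢
  exact sw_excl ll.toList 'c' 'r' "onfidence:".toList "easoning:".toList (by decide) h

-- appending a line at the end of the reversed list = folding it in first
theorem pvB_last_snoc (xs : List String) (x pre dflt : String) :
    pvB_last (xs ++ [x]) pre dflt =
      pvB_last xs pre
        (if PySem.Str.startswith (PySem.Str.lower x) pre then pvB_val x else dflt) := by
  induction xs with
  | nil => simp [pvB_last]
  | cons y ys ih => simp [pvB_last, ih]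

-- A's fold over the lines equals B's three reverse searches
theorem fold_eq (ls : List String) (m c r : String) :
    ls.foldl pvA_step (m, c, r) =
      (pvB_last ((ls.map PySem.Str.strip).reverse) "sentiment:" m,
       pvB_last ((ls.map PySem.Str.strip).reverse) "confidence:" c,
       pvB_last ((ls.map PySem.Str.strip).reverse) "reasoning:" r) := by
  induction ls generalizing m c r with
  | nil => simp [pvB_last]
  | cons l rest ih =>
    simp only [List.foldl_cons, List.map_cons, List.reverse_cons, pvB_last_snoc]
    have hstep : pvA_step (m, c, r) l =
        ((if PySem.Str.startswith (PySem.Str.lower (PySem.Str.strip l)) "sentiment:" then pvB_val (PySem.Str.strip l) else m),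
         (if PySem.Str.startswith (PySem.Str.lower (PySem.Str.strip l)) "confidence:" then pvB_val (PySem.Str.strip l) else c),
         (if PySem.Str.startswith (PySem.Str.lower (PySem.Str.strip l)) "reasoning:" then pvB_val (PySem.Str.strip l) else r)) := by
      unfold pvA_step pvA_after pvB_val
      by_cases hs : PySem.Str.startswith (PySem.Str.lower (PySem.Str.strip l)) "sentiment:" = true
      · simp only [hs, excl_sc _ hs, excl_sr _ hs, if_true, Bool.false_eq_true, if_false]
      · simp only [Bool.not_eq_true] at hs
        by_cases hc : PySem.Str.startswith (PySem.Str.lower (PySem.Str.strip l)) "confidence:" = true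
        · simp only [hs, hc, excl_cr _ hc, if_true, Bool.false_eq_true, if_false]
        · simp only [Bool.not_eq_true] at hc
          simp only [hs, hc, Bool.false_eq_true, if_false]
          split_ifs <;> rfl
    rw [hstep, ih]

-- ===== VERDICT (by name: the statement is the Claim_ definition above) =====
theorem parse_sentiment_py_spec : Claim_equal_parse_sentiment_py := by
  intro s _
  show parse_sentiment_py s = parse_sentiment_py_alt s
  unfold parse_sentiment_py parse_sentiment_py_alt
  by_cases h : PySem.Str.strip s = ""
  · simp [h]
  · simp only [if_neg h]
    rw [fold_eq]
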